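-- pv_equiv track=rewrite | github.com/muhamadirkham21/Learning-journey | learn-python/miniProject/thanosPlanet.py | calculate_populations
-- ===== SOURCE A (Python) =====
-- def calculate_populations(day):
--
--     """
--     Calculate the population growth over a given number of days.
--
--     Parameters:
--     - day (int): The number of days to calculate the population growth for.
--
--     Returns:
--     - int: The population after the given number of days.
--
--     The function calculates the population growth over the specified number of days.
--     The population triples every day, except for every third day when the population
--     is halved. The initial population is assumed to be 1.
--
--     Examples:
--     >>> calculate_populations(1)
--     1
--     >>> calculate_populations(2)
--     3
--     """
--
--     populations = 1
--     if day == 1: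
--         return populations
--     else:
--         for i in range(2, day+1):
--             if i % 3 == 0:
--                 populations //= 2
--             else:
--                 populations *= 3
--
--     return populations
-- ===== SOURCE B (Python) =====
-- def calculate_populations(day):
--     # Collapse each run of consecutive "triple" days into one power of 3,
--     # looping only over the halving boundaries (multiples of 3).
--     populations = 1
--     prev = 1
--     for boundary in range(3, day + 1, 3):
--         populations = populations * 3 ** (boundary - prev - 1) // 2
--         prev = boundary
--     if day > prev:
--         populations *= 3 ** (day - prev)
--     return populations
-- ===== Notes on version B (the rewrite author's own statement) =====
-- stated objective: alternative
-- what changed: Instead of iterating day by day, B loops only over the halving boundaries (multiples of 3 up to day), collapsing each run of consecutive triplings into one power of 3 before the single floor-halving, then applies the trailing triples as one power.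
import Mathlib
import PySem

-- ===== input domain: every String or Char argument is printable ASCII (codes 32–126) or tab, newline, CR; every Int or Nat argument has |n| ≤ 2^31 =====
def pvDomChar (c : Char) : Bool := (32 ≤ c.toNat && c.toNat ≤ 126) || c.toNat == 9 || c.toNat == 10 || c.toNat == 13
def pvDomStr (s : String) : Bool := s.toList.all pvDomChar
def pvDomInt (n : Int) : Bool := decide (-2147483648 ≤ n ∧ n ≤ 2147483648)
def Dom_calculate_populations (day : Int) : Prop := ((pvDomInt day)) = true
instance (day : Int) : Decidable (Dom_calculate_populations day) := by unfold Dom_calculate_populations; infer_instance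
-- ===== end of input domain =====

-- B collapses each run of consecutive triplings into one power of 3, looping only over the
-- halving boundaries (multiples of 3); same return value as A on every int day.

-- ===== PORT A =====
def calculate_populations (day : Int) : Int :=
  if day == 1 then 1
  else
    (PySem.List.pyRange 2 (day + 1) 1).foldl
      (fun populations i =>
        if PySem.Int.mod i 3 == 0 then PySem.Int.floordiv populations 2
        else populations * 3)
      1

-- ===== PORT B =====
-- the exponents boundary - prev - 1 and day - prev are nonnegative whenever taken
-- (prev < boundary along the loop, and day > prev is tested), so .toNat is exact here
def calculate_populations_alt (day : Int) : Int :=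
  let st :=
    (PySem.List.pyRange 3 (day + 1) 3).foldl
      (fun (st : Int × Int) boundary =>
        (PySem.Int.floordiv (st.1 * 3 ^ (boundary - st.2 - 1).toNat) 2, boundary))
      (1, 1)
  if day > st.2 then st.1 * 3 ^ (day - st.2).toNat else st.1

-- ===== PRECONDITION & SPEC =====
def Spec_calculate_populations (day : Int) (out : Int) : Prop := out = calculate_populations_alt day
instance (day : Int) (out : Int) : Decidable (Spec_calculate_populations day out) := by
  unfold Spec_calculate_populations; infer_instance

-- ===== CLAIM =====
def Claim_equal_calculate_populations : Prop :=
  ∀ (day : Int), Dom_calculate_populations day → Spec_calculate_populations day (calculate_populations day)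

-- ===== LEMMAS AND PROOFS =====

-- B's fold step, named so the lemmas can speak about it (definitionally the port's lambda)
def pvStepB (st : Int × Int) (boundary : Int) : Int × Int :=
  (PySem.Int.floordiv (st.1 * 3 ^ (boundary - st.2 - 1).toNat) 2, boundary)

lemma pvAltEq (day : Int) :
    calculate_populations_alt day =
      (if day > ((PySem.List.pyRange 3 (day + 1) 3).foldl pvStepB (1, 1)).2 then
        ((PySem.List.pyRange 3 (day + 1) 3).foldl pvStepB (1, 1)).1 *
          3 ^ (day - ((PySem.List.pyRange 3 (day + 1) 3).foldl pvStepB (1, 1)).2).toNat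
      else ((PySem.List.pyRange 3 (day + 1) 3).foldl pvStepB (1, 1)).1) := rfl

lemma pvSndFoldB : ∀ (l : List Int) (st : Int × Int),
    (l.foldl pvStepB st).2 ∈ l ∨ (l.foldl pvStepB st).2 = st.2 := by
  intro l
  induction l with
  | nil => intro st; simp
  | cons b t ih =>
    intro st
    rw [List.foldl_cons]
    rcases ih (pvStepB st b) with h | h
    · exact Or.inl (List.mem_cons_of_mem _ h)
    · rw [h]
      have hb : (pvStepB st b).2 = b := rfl
      rw [hb]
      exact Or.inl List.mem_cons_self

lemma pvRange3_stable (b : Int) (h : ¬ (3 : Int) ∣ b) :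
    PySem.List.pyRange 3 (b + 1) 3 = PySem.List.pyRange 3 b 3 := by
  rw [PySem.List.pyRange_of_pos _ _ (by norm_num), PySem.List.pyRange_of_pos _ _ (by norm_num)]
  have hd : ¬ b % 3 = 0 := fun hc => h (Int.dvd_of_emod_eq_zero hc)
  have hc : (if (3 : Int) < b + 1 then ((b + 1 - 3 + 3 - 1) / 3).toNat else 0)
      = (if (3 : Int) < b then ((b - 3 + 3 - 1) / 3).toNat else 0) := by
    split_ifs <;> omega
  rw [hc]

lemma pvRange3_append (b : Int) (h : (3 : Int) ∣ b) (h2 : 3 ≤ b) :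
    PySem.List.pyRange 3 (b + 1) 3 = PySem.List.pyRange 3 b 3 ++ [b] := by
  obtain ⟨m, hm⟩ := h
  have hm1 : 1 ≤ m := by omega
  rw [PySem.List.pyRange_of_pos _ _ (by norm_num), PySem.List.pyRange_of_pos _ _ (by norm_num)]
  have hc1 : (if (3 : Int) < b + 1 then ((b + 1 - 3 + 3 - 1) / 3).toNat else 0) = m.toNat := by
    split_ifs <;> omega
  have hc2 : (if (3 : Int) < b then ((b - 3 + 3 - 1) / 3).toNat else 0) = m.toNat - 1 := by
    split_ifs <;> omega
  rw [hc1, hc2]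
  have hms : m.toNat = (m.toNat - 1) + 1 := by omega
  rw [hms, List.range_succ, List.map_append]
  simp only [List.map_cons, List.map_nil]
  congr 2
  omega

-- main fold correspondence for day ≥ 2
lemma pvMain (d : Int) (hd : 2 ≤ d) :
    calculate_populations_alt d =
      (PySem.List.pyRange 2 (d + 1) 1).foldl
        (fun populations i =>
          if PySem.Int.mod i 3 == 0 then PySem.Int.floordiv populations 2
          else populations * 3) 1 := by
  induction d, hd using Int.le_induction with
  | base => decide
  | succ d hd ih =>
    have hA : PySem.List.pyRange 2 (d + 1 + 1) 1
        = PySem.List.pyRange 2 (d + 1) 1 ++ [d + 1] :=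
      PySem.List.pyRange_one_succ_right (by omega)
    set st := (PySem.List.pyRange 3 (d + 1) 3).foldl pvStepB (1, 1) with hst
    have hprev : st.2 ≤ d ∧ 1 ≤ st.2 := by
      rcases pvSndFoldB (PySem.List.pyRange 3 (d + 1) 3) (1, 1) with h | h
      · rw [← hst, PySem.List.mem_pyRange_iff_of_pos (by norm_num)] at h
        exact ⟨by omega, by omega⟩
      · rw [← hst] at h; rw [h]; exact ⟨by omega, by omega⟩
    have hBd' : calculate_populations_alt d = st.1 * 3 ^ (d - st.2).toNat := by
      rw [pvAltEq, ← hst]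
      split_ifs with hgt
      · rfl
      · have h0 : (d - st.2).toNat = 0 := by omega
        rw [h0, pow_zero, mul_one]
    rw [hA, List.foldl_append, List.foldl_cons, List.foldl_nil, ← ih]
    by_cases hdvd : (3 : Int) ∣ (d + 1)
    · -- d + 1 is a halving boundary
      have hmod : PySem.Int.mod (d + 1) 3 = 0 := (PySem.Int.mod_eq_zero_iff_dvd _ _).mpr hdvd
      rw [pvAltEq, pvRange3_append (d + 1) hdvd (by omega), List.foldl_append,
        List.foldl_cons, List.foldl_nil, ← hst]
      have hs2 : (pvStepB st (d + 1)).2 = d + 1 := rfl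
      have hs1 : (pvStepB st (d + 1)).1
          = PySem.Int.floordiv (st.1 * 3 ^ (d + 1 - st.2 - 1).toNat) 2 := rfl
      rw [hs2, hs1, if_neg (by omega), hmod]
      rw [hBd']
      simp only [BEq.rfl, if_true]
      have he : (d + 1 - st.2 - 1).toNat = (d - st.2).toNat := by omega
      rw [he]
    · -- d + 1 is a tripling day
      have hmod : ¬ PySem.Int.mod (d + 1) 3 = 0 := fun hc =>
        hdvd ((PySem.Int.mod_eq_zero_iff_dvd _ _).mp hc)
      rw [pvAltEq, pvRange3_stable (d + 1) hdvd, ← hst]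
      rw [if_pos (by omega : d + 1 > st.2)]
      have hbe : (PySem.Int.mod (d + 1) 3 == 0) = false := by
        simp only [beq_eq_false_iff_ne, ne_eq]; exact hmod
      rw [hbe]
      simp only [Bool.false_eq_true, if_false]
      rw [hBd']
      have he : (d + 1 - st.2).toNat = (d - st.2).toNat + 1 := by omega
      rw [he, pow_succ]
      ring

-- ===== VERDICT =====
theorem calculate_populations_spec : Claim_equal_calculate_populations := by
  intro day _
  unfold Spec_calculate_populations calculate_populations
  by_cases h2 : 2 ≤ day
  · rw [if_neg (by simp only [beq_iff_eq]; omega), ← pvMain day h2]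
  · -- day ≤ 1: A's loop range is empty, and so is B's boundary range; both return 1
    have hA1 : PySem.List.pyRange 2 (day + 1) 1 = [] :=
      PySem.List.pyRange_one_eq_nil (by omega)
    have hB1 : PySem.List.pyRange 3 (day + 1) 3 = [] := by
      rw [PySem.List.pyRange_of_pos _ _ (by norm_num), if_neg (by omega)]
      simp
    rw [pvAltEq, hB1, hA1]
    simp only [List.foldl_nil]
    rw [if_neg (by omega : ¬ day > (1, 1).2)]
    split_ifs <;> rfl
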